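-- pv_equiv track=rewrite | github.com/Zaanis/DSC20 | hw02.py | dict_of_states
-- ===== SOURCE A (Python) =====
-- def dict_of_states(tuples):
--     """
--     ##############################################################
--     takes a list of nicknames and return a dictionary, each key
--     is the state and the values are a list of nicknames
--     ##############################################################
--
--     >>> dict_of_states([('AL', 'Cotton State'),
--     ... ('LA', 'Pelican State'), ('LA', 'Creole State'),
--     ... ('AL', 'Yellowhammer State'), ('LA', 'Sugar State'),
--     ... ('MS', 'Magnolia State')])
--     {'AL': ['Cotton State', 'Yellowhammer State'], \
-- 'LA': ['Pelican State', 'Creole State', 'Sugar State'], \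
-- 'MS': ['Magnolia State']}
--
--     >>> dict_of_states([('MO', 'Show Me State'),
--     ... ('NY', 'Empire State'), ('NO STATE PROVIDED', 'Lone Star State')])
--     {'MO': ['Show Me State'], 'NY': ['Empire State'], \
-- 'NO STATE PROVIDED': ['Lone Star State']}
--
--     >>> dict_of_states([('NO STATE PROVIDED', 'Granite State'), \
--     ('NO STATE PROVIDED', 'Sooner State')])
--     {'NO STATE PROVIDED': ['Granite State', 'Sooner State']}
--
--     # Add at least 3 doctests below here #
--     >>> dict_of_states([])
--     {}
--
--     >>> dict_of_states([('LA', 'Cotton State'),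
--     ... ('LA', 'Pelican State'), ('LA', 'Creole State'),
--     ... ('LAL', 'Yellowhammer State'), ('LAL', 'Sugar State'),
--     ... ('LAL', 'Magnolia State')])
--     {'LA': ['Cotton State', 'Pelican State', 'Creole State'], \
-- 'LAL': ['Yellowhammer State', 'Sugar State', 'Magnolia State']}
--
--     >>> dict_of_states([('CA', 'Golden State'), ('LA', 'Pelican State'),
--     ... ('CA', 'Earthquake State')])
--     {'CA': ['Golden State', 'Earthquake State'], 'LA': ['Pelican State']}
--     """
--     return_dict = {}
--     for states in tuples:
--         state_abbrv = states[0]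
--         if state_abbrv not in return_dict:
--             return_dict[state_abbrv] = [states[1]]
--         elif state_abbrv in return_dict:
--             nickname_list = return_dict.get(state_abbrv)
--             nickname_list.append(states[1])
--             return_dict[state_abbrv] = nickname_list
--     return return_dict
-- ===== SOURCE B (Python) =====
-- def dict_of_states(tuples):
--     seen = set()
--     keys = []
--     for state, _ in tuples:
--         if state not in seen:
--             seen.add(state)
--             keys.append(state)
--     return {k: [nick for st, nick in tuples if st == k] for k in keys}
-- ===== Notes on version B (the rewrite author's own statement) =====
-- stated objective: alternative
-- what changed: Replaces the incremental dict-bucket building (lookup, append, reinsert per tuple) with a two-phase strategy: dedup the state keys in first-appearance order, then build each group's nickname list by a filter pass over the whole input.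
import Mathlib
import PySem

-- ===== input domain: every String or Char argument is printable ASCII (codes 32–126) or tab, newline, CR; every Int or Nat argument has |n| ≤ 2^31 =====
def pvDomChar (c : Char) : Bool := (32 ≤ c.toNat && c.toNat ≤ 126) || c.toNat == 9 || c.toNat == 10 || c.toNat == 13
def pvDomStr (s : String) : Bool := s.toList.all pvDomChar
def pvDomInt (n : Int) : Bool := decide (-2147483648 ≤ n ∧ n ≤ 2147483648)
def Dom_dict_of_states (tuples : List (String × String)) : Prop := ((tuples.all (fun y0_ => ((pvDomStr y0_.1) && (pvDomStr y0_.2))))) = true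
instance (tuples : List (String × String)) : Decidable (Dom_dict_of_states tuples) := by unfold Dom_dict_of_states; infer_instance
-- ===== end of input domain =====

-- B replaces A's incremental dict-bucket building with dedup-keys-then-filter grouping (alternative decomposition, same results).


-- ===== PORT A =====
-- one iteration of A's loop body (lookup, branch, append, reinsert)
def dictOfStatesStep (d : PySem.Dict String (List String)) (states : String × String) :
    PySem.Dict String (List String) :=
  let state_abbrv := states.1
  if ¬ d.contains state_abbrv then
    d.insert state_abbrv [states.2]
  else if d.contains state_abbrv then
    let nickname_list := (d.get? state_abbrv).getD []
    d.insert state_abbrv (nickname_list ++ [states.2])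
  else d

def dict_of_states (tuples : List (String × String)) : List (String × List String) :=
  (tuples.foldl dictOfStatesStep PySem.Dict.empty).items

-- ===== PORT B =====
-- the first loop of B: collect distinct states in first-appearance order (seen set, keys list)
def dictOfStatesKeys (tuples : List (String × String)) : List String :=
  (tuples.foldl
    (fun (acc : PySem.Set String × List String) t =>
      if PySem.Set.contains acc.1 t.1 then acc
      else (PySem.Set.add acc.1 t.1, acc.2 ++ [t.1]))
    (PySem.Set.empty, [])).2

def dict_of_states_alt (tuples : List (String × String)) : List (String × List String) :=
  (dictOfStatesKeys tuples).map
    (fun k => (k, (tuples.filter (fun t => t.1 == k)).map (·.2)))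

-- ===== PRECONDITION & SPEC =====
def Spec_dict_of_states (tuples : List (String × String)) (out : List (String × List String)) : Prop := out = dict_of_states_alt tuples
instance (tuples : List (String × String)) (out : List (String × List String)) : Decidable (Spec_dict_of_states tuples out) := by unfold Spec_dict_of_states; infer_instance

-- ===== CLAIM (what is proved, stated in full; the proofs are below) =====
def Claim_equal_dict_of_states : Prop := ∀ (tuples : List (String × String)), Dom_dict_of_states tuples → Spec_dict_of_states tuples (dict_of_states tuples)

-- ===== LEMMAS AND PROOFS =====

-- A's step is exactly a modify-with-append on the key
theorem dictOfStatesStep_eq_modify (d : PySem.Dict String (List String)) (st : String × String) :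
    dictOfStatesStep d st = d.modify st.1 [] (· ++ [st.2]) := by
  unfold dictOfStatesStep PySem.Dict.modify
  simp only [PySem.Dict.getD_eq_get?_getD]
  by_cases h : d.contains st.1 = true
  · simp [h]
  · have hn : d.get? st.1 = none :=
      (PySem.Dict.get?_eq_none_iff_contains d st.1).mpr (by simpa using h)
    simp [h, hn]

-- A's whole loop is a modify-with-append loop
theorem dictOfStatesFold_eq_modify (tuples : List (String × String)) :
    tuples.foldl dictOfStatesStep PySem.Dict.empty
      = tuples.foldl (fun d (p : String × String) => d.modify p.1 [] (· ++ [p.2]))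
          PySem.Dict.empty := by
  induction tuples using List.reverseRecOn with
  | nil => rfl
  | append_singleton ts t ih =>
    simp only [List.foldl_append, List.foldl_cons, List.foldl_nil, ih,
      dictOfStatesStep_eq_modify]

-- B's seen set and keys list coincide; the keys list grows as Set.update of the state column
theorem dictOfStatesKeys_loop (tuples : List (String × String)) (s : List String) :
    tuples.foldl
      (fun (acc : PySem.Set String × List String) t =>
        if PySem.Set.contains acc.1 t.1 then acc
        else (PySem.Set.add acc.1 t.1, acc.2 ++ [t.1]))
      (s, s)
    = (PySem.Set.update s (tuples.map (·.1)), PySem.Set.update s (tuples.map (·.1))) := by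
  induction tuples generalizing s with
  | nil => simp [PySem.Set.update]
  | cons t ts ih =>
    simp only [List.foldl_cons, List.map_cons]
    by_cases h : PySem.Set.contains s t.1 = true
    · have hm : t.1 ∈ s := by simpa [PySem.Set.contains] using h
      have hadd : PySem.Set.add s t.1 = s := by simp [PySem.Set.add, PySem.Set.contains, hm]
      rw [if_pos h, ih s]
      simp [PySem.Set.update, hadd]
    · have hm : t.1 ∉ s := by simpa [PySem.Set.contains] using h
      have hadd : PySem.Set.add s t.1 = s ++ [t.1] := by simp [PySem.Set.add, PySem.Set.contains, hm]
      rw [if_neg h, hadd, ih (s ++ [t.1])]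
      simp [PySem.Set.update, hadd]

theorem dictOfStatesKeys_eq (tuples : List (String × String)) :
    dictOfStatesKeys tuples = PySem.Set.update [] (tuples.map (·.1)) := by
  unfold dictOfStatesKeys
  rw [show (PySem.Set.empty : PySem.Set String) = ([] : List String) from rfl,
    dictOfStatesKeys_loop tuples []]

-- ===== VERDICT (by name: the statement is the Claim_ definition above) =====
theorem dict_of_states_spec : Claim_equal_dict_of_states := by
  intro tuples _
  unfold Spec_dict_of_states dict_of_states dict_of_states_alt
  rw [dictOfStatesFold_eq_modify tuples, dictOfStatesKeys_eq]
  have hnd : (List.foldl (fun d (p : String × String) => d.modify p.1 [] (· ++ [p.2]))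
      PySem.Dict.empty tuples).keys.Nodup :=
    PySem.Dict.nodup_keys_foldl_modify_key tuples (·.1) [] (fun d p => (· ++ [p.2]))
      PySem.Dict.empty PySem.Dict.nodup_keys_empty
  rw [PySem.Dict.items_eq_map_keys _ hnd [],
    PySem.Dict.keys_foldl_modify_key tuples (·.1) [] (fun d p => (· ++ [p.2])) PySem.Dict.empty,
    PySem.Dict.keys_empty]
  refine List.map_congr_left (fun k _ => ?_)
  rw [PySem.Dict.getD_foldl_modify_append tuples PySem.Dict.empty k, PySem.Dict.getD_empty, List.nil_append]
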